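-- pv_equiv track=rewrite | github.com/toki866/ApexTraderAI | ai_core/services/step_f_audit_service.py | _run_lengths
-- ===== SOURCE A (Python) =====
-- from typing import Dict, List, Sequence
--
-- def _run_lengths(regimes: List[int], target: int) -> List[int]:
--     lengths: List[int] = []
--     current = 0
--     for regime in regimes:
--         if regime == target:
--             current += 1
--         elif current:
--             lengths.append(current)
--             current = 0
--     if current:
--         lengths.append(current)
--     return lengths
-- ===== SOURCE B (Python) =====
-- from typing import List
--
--
-- def _run_lengths(regimes: List[int], target: int) -> List[int]:
--     n = len(regimes)
--     starts = [i for i in range(n)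
--               if regimes[i] == target and (i == 0 or regimes[i - 1] != target)]
--     ends = [i for i in range(n)
--             if regimes[i] == target and (i == n - 1 or regimes[i + 1] != target)]
--     return [e - s + 1 for s, e in zip(starts, ends)]
-- ===== Notes on version B (the rewrite author's own statement) =====
-- stated objective: alternative
-- what changed: Replaces A's single-pass running-counter state machine with a boundary-detection approach: two index scans collect the positions where runs of the target value start (element is target, predecessor is not) and end (element is target, successor is not), then the lengths are obtained by pairing each start with its end and subtracting.
import Mathlib
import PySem

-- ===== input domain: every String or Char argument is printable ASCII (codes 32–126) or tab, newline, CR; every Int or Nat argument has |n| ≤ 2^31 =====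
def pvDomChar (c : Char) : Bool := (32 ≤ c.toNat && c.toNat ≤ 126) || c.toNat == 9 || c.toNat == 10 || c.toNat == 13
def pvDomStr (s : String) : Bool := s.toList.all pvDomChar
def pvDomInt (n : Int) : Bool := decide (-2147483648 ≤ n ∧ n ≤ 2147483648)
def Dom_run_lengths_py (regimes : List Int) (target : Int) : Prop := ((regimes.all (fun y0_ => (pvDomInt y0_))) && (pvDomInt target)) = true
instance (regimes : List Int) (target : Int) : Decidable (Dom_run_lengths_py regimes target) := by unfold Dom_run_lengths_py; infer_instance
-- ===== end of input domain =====

-- B replaces A's running-counter state machine by boundary detection: two index scans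
-- collect run-start and run-end positions, which are then paired and subtracted (alternative, same O(n)).

-- ===== PORT A =====
-- loop over regimes carrying (lengths, current); final `if current:` flush after the loop
def runLenLoopA (target : Int) : List Int → Int → List Int → List Int
  | [], cur, acc => if cur ≠ 0 then acc ++ [cur] else acc
  | r :: rs, cur, acc =>
      if r = target then runLenLoopA target rs (cur + 1) acc
      else if cur ≠ 0 then runLenLoopA target rs 0 (acc ++ [cur])
      else runLenLoopA target rs 0 acc

def run_lengths_py (regimes : List Int) (target : Int) : List Int :=
  runLenLoopA target regimes 0 []

-- ===== PORT B =====
-- starts = [i for i in range(n) if regimes[i] == target and (i == 0 or regimes[i-1] != target)]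
-- ends   = [i for i in range(n) if regimes[i] == target and (i == n-1 or regimes[i+1] != target)]
-- return [e - s + 1 for s, e in zip(starts, ends)]
-- (all indices produced by range(n) are in range, so Python's list indexing is total here; getD is exact)
def run_lengths_py_alt (regimes : List Int) (target : Int) : List Int :=
  let n := regimes.length
  let starts := (List.range n).filter (fun i =>
    regimes.getD i 0 == target && (i == 0 || regimes.getD (i - 1) 0 != target))
  let ends := (List.range n).filter (fun i =>
    regimes.getD i 0 == target && (i == n - 1 || regimes.getD (i + 1) 0 != target))
  List.zipWith (fun (s e : Nat) => (e : Int) - (s : Int) + 1) starts ends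

-- ===== PRECONDITION & SPEC =====
def Spec_run_lengths_py (regimes : List Int) (target : Int) (out : List Int) : Prop := out = run_lengths_py_alt regimes target
instance (regimes : List Int) (target : Int) (out : List Int) : Decidable (Spec_run_lengths_py regimes target out) := by unfold Spec_run_lengths_py; infer_instance

-- ===== CLAIM (what is proved, stated in full; the proofs are below) =====
def Claim_equal_run_lengths_py : Prop := ∀ (regimes : List Int) (target : Int), Dom_run_lengths_py regimes target → Spec_run_lengths_py regimes target (run_lengths_py regimes target)

-- ===== LEMMAS AND PROOFS =====

-- recursive characterisations of B's two filtered index lists (proof-side only)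
def headIs (target : Int) : List Int → Bool
  | [] => false
  | z :: _ => z == target

def sRec (target prev : Int) : List Int → List Nat
  | [] => []
  | y :: ys => (if y = target ∧ prev ≠ target then [0] else []) ++ (sRec target y ys).map (· + 1)

def eRec (target : Int) : List Int → List Nat
  | [] => []
  | y :: ys => (if y = target ∧ headIs target ys = false then [0] else []) ++ (eRec target ys).map (· + 1)

def lenOf (s e : Nat) : Int := (e : Int) - (s : Int) + 1

-- the part of A's output produced from state `cur` onward (accumulator peeled off)
def runTail (target : Int) : List Int → Int → List Int
  | [], cur => if cur ≠ 0 then [cur] else []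
  | r :: rs, cur =>
      if r = target then runTail target rs (cur + 1)
      else if cur ≠ 0 then cur :: runTail target rs 0
      else runTail target rs 0

theorem runLenLoopA_acc (target : Int) (xs : List Int) :
    ∀ (cur : Int) (acc : List Int),
      runLenLoopA target xs cur acc = acc ++ runTail target xs cur := by
  induction xs with
  | nil => intro cur acc; simp [runLenLoopA, runTail]; split_ifs <;> simp
  | cons r rs ih =>
      intro cur acc
      simp only [runLenLoopA, runTail]
      split_ifs with h1 h2
      · exact ih _ _
      · rw [ih]; simp
      · exact ih _ _

theorem starts_bridge (target : Int) (xs : List Int) :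
    ∀ prev : Int,
      (List.range xs.length).filter
          (fun i => xs.getD i 0 == target && ((prev :: xs).getD i 0 != target))
        = sRec target prev xs := by
  induction xs with
  | nil => intro prev; simp [sRec]
  | cons x rest ih =>
      intro prev
      rw [List.length_cons, List.range_succ_eq_map, List.filter_cons, List.filter_map]
      have hcomp :
          ((fun i => (x :: rest).getD i 0 == target && ((prev :: x :: rest).getD i 0 != target)) ∘ Nat.succ)
            = (fun i => rest.getD i 0 == target && ((x :: rest).getD i 0 != target)) := by
        funext i; rfl
      rw [hcomp, ih x]
      simp only [sRec]
      by_cases hx : x = target <;> by_cases hp : prev = target <;>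
        simp [hx, hp, List.getD]

theorem starts_eq (target : Int) (xs : List Int) :
    (List.range xs.length).filter
        (fun i => xs.getD i 0 == target && (i == 0 || xs.getD (i - 1) 0 != target))
      = sRec target (target + 1) xs := by
  rw [← starts_bridge target xs (target + 1)]
  apply List.filter_congr
  intro i _
  cases i with
  | zero => simp [List.getD]
  | succ j => simp

theorem ends_bridge (target : Int) (xs : List Int) :
    (List.range xs.length).filter
        (fun i => xs.getD i 0 == target && (i == xs.length - 1 || xs.getD (i + 1) 0 != target))
      = eRec target xs := by
  induction xs with
  | nil => simp [eRec]
  | cons x rest ih =>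
      rw [List.length_cons, List.range_succ_eq_map, List.filter_cons, List.filter_map]
      simp only [Nat.add_sub_cancel]
      have hshift :
          (List.range rest.length).filter
              ((fun i => (x :: rest).getD i 0 == target &&
                 (i == rest.length || (x :: rest).getD (i + 1) 0 != target)) ∘ Nat.succ)
            = eRec target rest := by
        rw [← ih]
        apply List.filter_congr
        intro i hi
        have hi' : i < rest.length := List.mem_range.mp hi
        simp only [Function.comp]
        have h3 : (Nat.succ i == rest.length) = (i == rest.length - 1) := by
          rw [Bool.eq_iff_iff]
          simp only [Nat.succ_eq_add_one, beq_iff_eq]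
          omega
        rw [h3]
        rfl
      rw [hshift]
      by_cases hx : x = target
      · cases rest with
        | nil => simp [eRec, headIs, hx]
        | cons z zs =>
            by_cases hz : z = target
            · have hh : headIs target (z :: zs) = true := by simp [headIs, hz]
              simp only [eRec, hh]
              simp [hx, hz, List.getD]
            · have hh : headIs target (z :: zs) = false := by simp [headIs, hz]
              simp only [eRec, hh]
              simp [hx, hz, List.getD]
      · simp only [eRec]
        cases rest with
        | nil => simp [hx, headIs]
        | cons z zs => simp [hx, headIs, List.getD]

theorem zipWith_lenOf_map_succ (a : List Nat) :
    ∀ b : List Nat,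
      List.zipWith lenOf (a.map (· + 1)) (b.map (· + 1)) = List.zipWith lenOf a b := by
  induction a with
  | nil => intro b; simp
  | cons x xs ih =>
      intro b
      cases b with
      | nil => simp
      | cons y ys =>
          simp only [List.map_cons, List.zipWith_cons_cons, ih]
          congr 1
          simp only [lenOf]
          push_cast
          ring

theorem eRec_head (target : Int) (xs : List Int) (h : headIs target xs = true) :
    ∃ es, eRec target xs = ((xs.takeWhile (· == target)).length - 1) :: es ∧
      1 ≤ (xs.takeWhile (· == target)).length := by
  induction xs with
  | nil => simp [headIs] at h
  | cons y ys ih =>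
      have hy : y = target := by simpa [headIs] using h
      by_cases hys : headIs target ys = true
      · obtain ⟨es, he, ht⟩ := ih hys
        refine ⟨es.map (· + 1), ?_, ?_⟩
        · simp only [eRec, hys]
          rw [he]
          have hif : ¬ (y = target ∧ (true : Bool) = false) := by simp
          rw [if_neg hif, List.nil_append, List.map_cons]
          have hbl : (y == target) = true := by simp [hy]
          simp only [List.takeWhile, hbl, List.length_cons]
          congr 1
          omega
        · simp [List.takeWhile, hy]
      · have hys' : headIs target ys = false := by simpa using hys
        refine ⟨(eRec target ys).map (· + 1), ?_, ?_⟩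
        · simp only [eRec]
          rw [if_pos ⟨hy, hys'⟩, List.singleton_append]
          congr 1
          cases ys with
          | nil => simp [List.takeWhile, hy]
          | cons z zs =>
              have hz : (z == target) = false := by
                have : ¬ z = target := by simpa [headIs] using hys'
                simp [this]
              simp [List.takeWhile, hy, hz]
        · simp [List.takeWhile, hy]

theorem main_inv (target : Int) (xs : List Int) :
    (∀ prev : Int, (prev ≠ target ∨ headIs target xs = false) →
        List.zipWith lenOf (sRec target prev xs) (eRec target xs) = runTail target xs 0) ∧
    (∀ cur : Int, 0 < cur → (headIs target xs = true ∨ xs = []) →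
        runTail target xs cur =
          (cur + ((xs.takeWhile (· == target)).length : Int)) ::
            List.zipWith lenOf (sRec target target xs) ((eRec target xs).drop 1)) := by
  induction xs with
  | nil =>
      constructor
      · intro prev _; simp [sRec, eRec, runTail]
      · intro cur hcur _
        have hc : cur ≠ 0 := by omega
        simp [runTail, sRec, eRec, List.takeWhile, hc]
  | cons y ys ih =>
      obtain ⟨ih1, ih2⟩ := ih
      constructor
      · intro prev hprev
        by_cases hy : y = target
        · subst hy
          have hp : prev ≠ y := by
            rcases hprev with h | h
            · exact h
            · simp [headIs] at h
          have hs : sRec y prev (y :: ys) = 0 :: (sRec y y ys).map (· + 1) := by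
            simp only [sRec]
            rw [if_pos ⟨trivial, hp⟩]
            rfl
          cases hys : headIs y ys with
          | false =>
              have hev : eRec y (y :: ys) = 0 :: (eRec y ys).map (· + 1) := by
                simp only [eRec]
                rw [if_pos ⟨trivial, hys⟩]
                rfl
              have h1 : lenOf 0 0 = 1 := by simp [lenOf]
              rw [hs, hev, List.zipWith_cons_cons, zipWith_lenOf_map_succ, h1,
                ih1 y (Or.inr hys)]
              simp only [runTail, reduceIte]
              cases ys with
              | nil => simp [runTail]
              | cons z zs =>
                  have hz : ¬ z = y := by simpa [headIs] using hys
                  simp [runTail, hz]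
          | true =>
              obtain ⟨es, he, ht⟩ := eRec_head y ys hys
              have hev : eRec y (y :: ys) = (eRec y ys).map (· + 1) := by
                simp only [eRec]
                rw [if_neg (by simp [hys] : ¬ (True ∧ headIs y ys = false))]
                rfl
              rw [hs, hev, he, List.map_cons, List.zipWith_cons_cons, zipWith_lenOf_map_succ]
              simp only [runTail, reduceIte, zero_add]
              rw [ih2 1 one_pos (Or.inl hys), he]
              simp only [List.drop_succ_cons, List.drop_zero]
              congr 1
              rw [Nat.sub_add_cancel ht]
              simp only [lenOf]
              push_cast
              ring
        · have hs : sRec target prev (y :: ys) = (sRec target y ys).map (· + 1) := by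
            simp only [sRec]
            rw [if_neg (by tauto)]
            rfl
          have hev : eRec target (y :: ys) = (eRec target ys).map (· + 1) := by
            simp only [eRec]
            rw [if_neg (by tauto)]
            rfl
          rw [hs, hev, zipWith_lenOf_map_succ, ih1 y (Or.inl hy)]
          simp [runTail, hy]
      · intro cur hcur hh
        have hy : y = target := by
          rcases hh with h | h
          · simpa [headIs] using h
          · simp at h
        subst hy
        have hs : sRec y y (y :: ys) = (sRec y y ys).map (· + 1) := by
          simp only [sRec]
          rw [if_neg (by simp)]
          rfl
        have htw : (y :: ys).takeWhile (· == y) = y :: ys.takeWhile (· == y) := by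
          simp [List.takeWhile]
        have hrt : runTail y (y :: ys) cur = runTail y ys (cur + 1) := by
          simp [runTail]
        rw [hrt]
        cases hys : headIs y ys with
        | true =>
            have hev : eRec y (y :: ys) = (eRec y ys).map (· + 1) := by
              simp only [eRec]
              rw [if_neg (by simp [hys] : ¬ (True ∧ headIs y ys = false))]
              rfl
            rw [ih2 (cur + 1) (by omega) (Or.inl hys), hs, hev, htw, List.length_cons,
              ← List.map_drop, zipWith_lenOf_map_succ]
            congr 1
            push_cast
            ring
        | false =>
            have hev : eRec y (y :: ys) = 0 :: (eRec y ys).map (· + 1) := by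
              simp only [eRec]
              rw [if_pos ⟨trivial, hys⟩]
              rfl
            have htw0 : (ys.takeWhile (· == y)).length = 0 := by
              cases ys with
              | nil => simp
              | cons z zs =>
                  have hz : (z == y) = false := by
                    have : ¬ z = y := by simpa [headIs] using hys
                    simp [this]
                  simp [List.takeWhile, hz]
            rw [hs, hev, htw, List.length_cons, htw0]
            simp only [List.drop_succ_cons, List.drop_zero]
            rw [zipWith_lenOf_map_succ]
            cases ys with
            | nil =>
                have hc : cur + 1 ≠ 0 := by omega
                simp [runTail, hc, sRec, eRec]
            | cons z zs =>
                have hz : ¬ z = y := by simpa [headIs] using hys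
                rw [ih1 y (Or.inr hys)]
                have hc : cur + 1 ≠ 0 := by omega
                simp [runTail, hz, hc]

-- ===== VERDICT (by name: the statement is the Claim_ definition above) =====
theorem run_lengths_py_spec : Claim_equal_run_lengths_py := by
  intro regimes target _
  unfold Spec_run_lengths_py run_lengths_py run_lengths_py_alt
  rw [runLenLoopA_acc, List.nil_append]
  show runTail target regimes 0 = List.zipWith lenOf _ _
  rw [starts_eq, ends_bridge]
  exact ((main_inv target regimes).1 (target + 1) (Or.inl (by omega))).symm
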